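-- pv_equiv track=rewrite | github.com/DFPortela2001/Python-LearningExercises | Ficha 10/Ex. 1 - MCB.py | criar_lista
-- ===== SOURCE A (Python) =====
-- def criar_lista(frase):
--     palavras = frase.split()
--     lista_unica = []
--     posicoes = {}
--
--     for i, palavra in enumerate(palavras):
--         if palavra not in lista_unica:
--             lista_unica.append(palavra)
--             posicoes[palavra] = [i]
--         else:
--             posicoes[palavra].append(i)
--
--     return lista_unica, posicoes
-- ===== SOURCE B (Python) =====
-- def criar_lista(frase):
--     palavras = frase.split()
--     lista_unica = list(dict.fromkeys(palavras))
--     posicoes = {w: [i for i, p in enumerate(palavras) if p == w]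
--                 for w in lista_unica}
--     return lista_unica, posicoes
-- ===== Notes on version B (the rewrite author's own statement) =====
-- stated objective: alternative
-- what changed: B is staged instead of incremental: it first deduplicates the word list with dict.fromkeys, then builds each word's index list by a separate comprehension over enumerate(palavras), instead of A's single loop that conditionally appends/extends a growing list and dict.
import Mathlib
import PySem

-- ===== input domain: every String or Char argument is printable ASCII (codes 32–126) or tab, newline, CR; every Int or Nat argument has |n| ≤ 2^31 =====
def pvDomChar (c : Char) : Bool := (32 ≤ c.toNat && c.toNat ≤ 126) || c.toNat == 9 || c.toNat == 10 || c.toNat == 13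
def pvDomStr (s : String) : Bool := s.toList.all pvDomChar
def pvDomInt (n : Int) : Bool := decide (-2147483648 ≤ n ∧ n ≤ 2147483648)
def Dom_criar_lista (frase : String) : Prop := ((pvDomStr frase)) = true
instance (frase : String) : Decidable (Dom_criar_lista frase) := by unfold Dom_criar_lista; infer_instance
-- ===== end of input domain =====

-- B is staged instead of incremental: dedupe first, then a per-word index scan (objective: alternative).
-- ===== PORT A =====
def criar_lista (frase : String) : List String × (List (String × List Int)) :=
  let palavras := PySem.Str.split₀ frase
  let r := (PySem.List.enumerate palavras 0).foldl
    (fun st p =>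
      if p.2 ∉ st.1 then (st.1 ++ [p.2], st.2.insert p.2 [p.1])
      else (st.1, st.2.modify p.2 [] (· ++ [p.1])))
    (([] : List String), (PySem.Dict.empty : PySem.Dict String (List Int)))
  (r.1, r.2.items)

-- ===== PORT B =====
def criar_lista_alt (frase : String) : List String × (List (String × List Int)) :=
  let palavras := PySem.Str.split₀ frase
  let lista_unica := PySem.List.dedup palavras
  let posicoes := lista_unica.foldl
    (fun d w => d.insert w
      (((PySem.List.enumerate palavras 0).filter (fun p => p.2 == w)).map (·.1)))
    (PySem.Dict.empty : PySem.Dict String (List Int))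
  (lista_unica, posicoes.items)

-- ===== PRECONDITION & SPEC =====
def Spec_criar_lista (frase : String) (out : List String × (List (String × List Int))) : Prop := out = criar_lista_alt frase
instance (frase : String) (out : List String × (List (String × List Int))) : Decidable (Spec_criar_lista frase out) := by unfold Spec_criar_lista; infer_instance

-- ===== CLAIM =====
def Claim_equal_criar_lista : Prop := ∀ (frase : String), Dom_criar_lista frase → Spec_criar_lista frase (criar_lista frase)

-- ===== LEMMAS AND PROOFS =====

-- A's loop, characterised: the list is the first-occurrence dedup of the words seen
-- so far, and the dict's items pair each such word with its index list.
lemma a_loop_char (l : List (Int × String)) :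
    (l.foldl
      (fun (st : List String × PySem.Dict String (List Int)) p =>
        if p.2 ∉ st.1 then (st.1 ++ [p.2], st.2.insert p.2 [p.1])
        else (st.1, st.2.modify p.2 [] (· ++ [p.1])))
      (([] : List String), (PySem.Dict.empty : PySem.Dict String (List Int))))
    = (PySem.List.dedup (l.map (·.2)),
       PySem.Dict.mk ((PySem.List.dedup (l.map (·.2))).map
         (fun w => (w, (l.filter (fun p => p.2 == w)).map (·.1))))) := by
  induction l using List.reverseRecOn with
  | nil => rfl
  | append_singleton l p ih =>
    rw [List.foldl_append, ih]
    simp only [List.foldl_cons, List.foldl_nil, List.map_append, List.map_cons, List.map_nil,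
      PySem.List.dedup_eq_ofList, PySem.Set.ofList_append_singleton, PySem.Set.add_eq_ite]
    by_cases hm : p.2 ∈ PySem.Set.ofList (l.map (·.2))
    · -- word already seen: modify in place
      have hnd : (PySem.Set.ofList (l.map (·.2))).Nodup := PySem.Set.nodup_ofList _
      have hkeys : (PySem.Dict.mk ((PySem.Set.ofList (l.map (·.2))).map
          (fun w => (w, (l.filter (fun p => p.2 == w)).map (·.1))))).keys
          = PySem.Set.ofList (l.map (·.2)) := by
        simp only [PySem.Dict.keys, List.map_map]
        exact List.map_id' _
      have hget : (PySem.Dict.mk ((PySem.Set.ofList (l.map (·.2))).map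
          (fun w => (w, (l.filter (fun p => p.2 == w)).map (·.1))))).getD p.2 []
          = (l.filter (fun q => q.2 == p.2)).map (·.1) := by
        apply PySem.Dict.getD_of_mem_items
        ·           exact List.mem_map.mpr ⟨p.2, hm, rfl⟩
        · rw [hkeys]; exact hnd
      have hcont : (PySem.Dict.mk ((PySem.Set.ofList (l.map (·.2))).map
          (fun w => (w, (l.filter (fun p => p.2 == w)).map (·.1))))).contains p.2 = true := by
        rw [PySem.Dict.contains_iff_mem_keys, hkeys]; exact hm
      rw [if_neg (by simpa using hm), if_pos hm]
      refine Prod.ext rfl ?_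
      apply PySem.Dict.ext
      rw [show ∀ (d : PySem.Dict String (List Int)) k f, d.modify k ([] : List Int) f
            = d.insert k (f (d.getD k [])) from fun _ _ _ => rfl,
        PySem.Dict.items_insert_of_contains _ _ hcont, hget]
      simp only [List.map_map]
      refine List.map_congr_left (fun w hw => ?_)
      by_cases hwp : w = p.2
      · subst hwp
        simp [List.filter_append]
      · have : (w == p.2) = false := by simp [hwp]
        simp [Function.comp, this, List.filter_append, Ne.symm hwp]
    · -- new word: append to both
      have hnotl : p.2 ∉ l.map (·.2) := fun h => hm ((PySem.Set.mem_ofList _ _).mpr h)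
      have hfilt : l.filter (fun q => q.2 == p.2) = [] := by
        apply List.filter_eq_nil_iff.mpr
        intro q hq hq2
        exact hnotl (List.mem_map.mpr ⟨q, hq, by simpa using hq2⟩)
      have hcont : (PySem.Dict.mk ((PySem.Set.ofList (l.map (·.2))).map
          (fun w => (w, (l.filter (fun p => p.2 == w)).map (·.1))))).contains p.2 = false := by
        rw [Bool.eq_false_iff]
        intro hc
        apply hm
        have := (PySem.Dict.contains_iff_mem_keys _ _).mp hc
        simpa [PySem.Dict.keys] using this
      rw [if_pos (by simpa using hm), if_neg hm]
      refine Prod.ext rfl ?_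
      apply PySem.Dict.ext
      rw [PySem.Dict.items_insert_of_not_contains _ _ hcont]
      simp only [List.map_append, List.map_cons, List.map_nil]
      congr 1
      · refine List.map_congr_left (fun w hw => ?_)
        have hwp : w ≠ p.2 := fun h => hm (h ▸ hw)
        have : (p.2 == w) = false := by simp [Ne.symm hwp]
        simp [List.filter_append, this]
      · simp [List.filter_append, hfilt]

-- B's fold over fresh distinct keys appends its pairs in order.
lemma b_items (palavras : List String) :
    ((PySem.List.dedup palavras).foldl
      (fun (d : PySem.Dict String (List Int)) w => d.insert w
        (((PySem.List.enumerate palavras 0).filter (fun p => p.2 == w)).map (·.1)))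
      PySem.Dict.empty).items
    = (PySem.List.dedup palavras).map
        (fun w => (w, ((PySem.List.enumerate palavras 0).filter (fun p => p.2 == w)).map (·.1))) := by
  have h := PySem.Dict.items_foldl_insert_fresh (PySem.List.dedup palavras)
    (fun w => w)
    (fun w => ((PySem.List.enumerate palavras 0).filter (fun p => p.2 == w)).map (·.1))
    PySem.Dict.empty (fun a _ => rfl)
    (by rw [List.map_id']; exact PySem.List.nodup_dedup palavras)
  simp at h; exact h

-- ===== VERDICT =====
theorem criar_lista_spec : Claim_equal_criar_lista := by
  intro frase _
  unfold Spec_criar_lista criar_lista criar_lista_alt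
  show (((PySem.List.enumerate (PySem.Str.split₀ frase) 0).foldl
      (fun st p =>
        if p.2 ∉ st.1 then (st.1 ++ [p.2], st.2.insert p.2 [p.1])
        else (st.1, st.2.modify p.2 [] (· ++ [p.1])))
      (([] : List String), (PySem.Dict.empty : PySem.Dict String (List Int)))).1,
     ((PySem.List.enumerate (PySem.Str.split₀ frase) 0).foldl
      (fun st p =>
        if p.2 ∉ st.1 then (st.1 ++ [p.2], st.2.insert p.2 [p.1])
        else (st.1, st.2.modify p.2 [] (· ++ [p.1])))
      (([] : List String), (PySem.Dict.empty : PySem.Dict String (List Int)))).2.items)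
    = (PySem.List.dedup (PySem.Str.split₀ frase),
       ((PySem.List.dedup (PySem.Str.split₀ frase)).foldl
        (fun (d : PySem.Dict String (List Int)) w => d.insert w
          (((PySem.List.enumerate (PySem.Str.split₀ frase) 0).filter (fun p => p.2 == w)).map (·.1)))
        PySem.Dict.empty).items)
  rw [a_loop_char, b_items, PySem.List.map_snd_enumerate]
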